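-- pv_equiv track=rewrite | github.com/msns83/UT_CE_Projects | Algorihm Design/2/3.py | count_balanced_arrangements
-- ===== SOURCE A (Python) =====
-- def count_balanced_arrangements(n, m, v, c):
--     MOD = 10**8
--
--     dp = [[[0, 0] for _ in range(m + 1)] for _ in range(n + 1)]
--     dp[0][0][0] = 1
--     dp[0][0][1] = 1
--
--     for i in range(n + 1):
--         for j in range(m + 1):
--             if i > 0:
--                 for k in range(1, v + 1):
--                     if i - k >= 0:
--                         dp[i][j][0] += dp[i - k][j][1]
--                         dp[i][j][0] %= MOD
--
--             if j > 0:
--                 for k in range(1, c + 1):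
--                     if j - k >= 0:
--                         dp[i][j][1] += dp[i][j - k][0]
--                         dp[i][j][1] %= MOD
--
--     result = (dp[n][m][0] + dp[n][m][1]) % MOD
--     return result
-- ===== SOURCE B (Python) =====
-- def count_balanced_arrangements(n, m, v, c):
--     MOD = 10 ** 8
--     # Sliding-window prefix sums replace A's inner k-loops:
--     # pref1[j] = prefix sums of state-1 values down column j,
--     # rowpref0 = prefix sums of state-0 values along the current row.
--     pref1 = [[0] for _ in range(m + 1)]
--     for i in range(n + 1):
--         rowpref0 = [0]
--         row1 = []
--         for j in range(m + 1):
--             if i == 0 and j == 0: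
--                 d0, d1 = 1, 1
--             else:
--                 lo0 = min(i, max(0, i - v))
--                 d0 = (pref1[j][i] - pref1[j][lo0]) % MOD
--                 lo1 = min(j, max(0, j - c))
--                 d1 = (rowpref0[j] - rowpref0[lo1]) % MOD
--             rowpref0.append(rowpref0[j] + d0)
--             row1.append(d1)
--         for j in range(m + 1):
--             pref1[j].append(pref1[j][i] + row1[j])
--     return (d0 + d1) % MOD
-- ===== Notes on version B (the rewrite author's own statement) =====
-- stated objective: faster
-- what changed: Replaced A's inner k-loops (window sums recomputed cell by cell) with sliding-window prefix sums along each row and down each column, so every dp cell is computed in O(1).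
import Mathlib
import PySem

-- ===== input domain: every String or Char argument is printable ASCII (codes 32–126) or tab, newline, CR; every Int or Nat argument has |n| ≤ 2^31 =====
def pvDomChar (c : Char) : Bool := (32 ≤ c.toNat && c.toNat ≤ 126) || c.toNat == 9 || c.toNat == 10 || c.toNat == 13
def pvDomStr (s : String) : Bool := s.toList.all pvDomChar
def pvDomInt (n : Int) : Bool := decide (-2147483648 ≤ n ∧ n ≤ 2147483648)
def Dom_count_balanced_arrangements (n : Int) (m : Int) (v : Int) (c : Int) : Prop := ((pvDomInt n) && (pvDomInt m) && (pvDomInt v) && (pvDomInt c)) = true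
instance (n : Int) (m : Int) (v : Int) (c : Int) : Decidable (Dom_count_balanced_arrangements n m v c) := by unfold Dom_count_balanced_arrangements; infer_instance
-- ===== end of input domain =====

-- B replaces A's inner k-loops by sliding-window prefix sums (one O(1) step per dp cell);
-- B replaces A's inner k-loops by sliding-window prefix sums (one O(1) step per dp cell);
-- objective: faster (a timing run measures it; asymptotically O(n*m) vs O(n*m*(v+c))).
-- Python's index-mutated lists (A's dp grid, B's pref1/rowpref0) are ported as Lean lists with
-- List.set / getD; every index the ports read or write is ≥ 0 and in range under Pre_
-- (n ≥ 0 and m ≥ 0; Python A raises IndexError otherwise), so .toNat there is exact.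

-- ===== PORT A =====
-- dp[i][j] as a pair; reads dp[i][j][0]/[1] are the pair components
def pvAGet (dp : List (List (Int × Int))) (i j : Int) : Int × Int :=
  (dp.getD i.toNat []).getD j.toNat (0, 0)

-- dp[i][j][0] += x; dp[i][j][0] %= MOD  (two statements on one cell, written as one update)
def pvAUpd0 (dp : List (List (Int × Int))) (i j a : Int) : List (List (Int × Int)) :=
  dp.set i.toNat ((dp.getD i.toNat []).set j.toNat (a, (pvAGet dp i j).2))

def pvAUpd1 (dp : List (List (Int × Int))) (i j b : Int) : List (List (Int × Int)) :=
  dp.set i.toNat ((dp.getD i.toNat []).set j.toNat ((pvAGet dp i j).1, b))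

-- for k in range(1, v + 1): if i - k >= 0: dp[i][j][0] += dp[i-k][j][1]; dp[i][j][0] %= MOD
def pvAInner0 (v i j : Int) (dp : List (List (Int × Int))) : List (List (Int × Int)) :=
  (PySem.List.pyRange 1 (v + 1) 1).foldl
    (fun dp k => if 0 ≤ i - k then
      pvAUpd0 dp i j (((pvAGet dp i j).1 + (pvAGet dp (i - k) j).2) % 100000000) else dp) dp

-- for k in range(1, c + 1): if j - k >= 0: dp[i][j][1] += dp[i][j-k][0]; dp[i][j][1] %= MOD
def pvAInner1 (c i j : Int) (dp : List (List (Int × Int))) : List (List (Int × Int)) :=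
  (PySem.List.pyRange 1 (c + 1) 1).foldl
    (fun dp k => if 0 ≤ j - k then
      pvAUpd1 dp i j (((pvAGet dp i j).2 + (pvAGet dp i (j - k)).1) % 100000000) else dp) dp

-- the body of the j-loop: 'if i > 0: <k-loop 0>' then 'if j > 0: <k-loop 1>'
def pvACell (v c i j : Int) (dp : List (List (Int × Int))) : List (List (Int × Int)) :=
  let dp1 := if 0 < i then pvAInner0 v i j dp else dp
  if 0 < j then pvAInner1 c i j dp1 else dp1

def count_balanced_arrangements (n : Int) (m : Int) (v : Int) (c : Int) : Int :=
  -- dp = [[[0, 0] for _ in range(m + 1)] for _ in range(n + 1)]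
  let dp0 : List (List (Int × Int)) :=
    (PySem.List.pyRange 0 (n + 1) 1).map
      (fun _ => (PySem.List.pyRange 0 (m + 1) 1).map (fun _ => ((0 : Int), (0 : Int))))
  -- dp[0][0][0] = 1; dp[0][0][1] = 1
  let dp1 := pvAUpd0 dp0 0 0 1
  let dp2 := pvAUpd1 dp1 0 0 1
  let dp := (PySem.List.pyRange 0 (n + 1) 1).foldl
    (fun dp i => (PySem.List.pyRange 0 (m + 1) 1).foldl (fun dp j => pvACell v c i j dp) dp) dp2
  ((pvAGet dp n m).1 + (pvAGet dp n m).2) % 100000000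

-- ===== PORT B =====
-- the (d0, d1) pair computed in the body of B's j-loop
def pvBDD (v c i j : Int) (pref1 : List (List Int)) (rowpref0 : List Int) : Int × Int :=
  if i = 0 ∧ j = 0 then (1, 1)
  else
    let lo0 := min i (max 0 (i - v))
    let d0 := (PySem.List.pyGetD (PySem.List.pyGetD pref1 j []) i 0
      - PySem.List.pyGetD (PySem.List.pyGetD pref1 j []) lo0 0) % 100000000
    let lo1 := min j (max 0 (j - c))
    let d1 := (PySem.List.pyGetD rowpref0 j 0 - PySem.List.pyGetD rowpref0 lo1 0) % 100000000
    (d0, d1)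

-- body of B's j-loop; state = (pref1, rowpref0, (d0, d1));
-- rowpref0.append(rowpref0[j] + d0); pref1[j].append(pref1[j][i] + d1)
def pvBCell (v c i j : Int) (st : List (List Int) × List Int × Int × Int) :
    List (List Int) × List Int × Int × Int :=
  let dd := pvBDD v c i j st.1 st.2.1
  (st.1.set j.toNat (PySem.List.pyGetD st.1 j []
      ++ [PySem.List.pyGetD (PySem.List.pyGetD st.1 j []) i 0 + dd.2]),
   st.2.1 ++ [PySem.List.pyGetD st.2.1 j 0 + dd.1], dd)

-- body of B's i-loop; state = (pref1, (d0, d1)); rowpref0 = [0] restarts each row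
def pvBRow (m v c i : Int) (st : List (List Int) × Int × Int) : List (List Int) × Int × Int :=
  let r := (PySem.List.pyRange 0 (m + 1) 1).foldl (fun s j => pvBCell v c i j s) (st.1, ([0] : List Int), st.2)
  (r.1, r.2.2)

def count_balanced_arrangements_alt (n : Int) (m : Int) (v : Int) (c : Int) : Int :=
  -- pref1 = [[0] for _ in range(m + 1)]
  let st := (PySem.List.pyRange 0 (n + 1) 1).foldl (fun s i => pvBRow m v c i s)
    ((PySem.List.pyRange 0 (m + 1) 1).map (fun _ => ([0] : List Int)), (0 : Int), (0 : Int))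
  (st.2.1 + st.2.2) % 100000000

-- ===== PRECONDITION & SPEC =====
-- Pre_: Python A raises IndexError when n < 0 (dp == []) or m < 0 (dp[0] == []).
def Pre_count_balanced_arrangements (n : Int) (m : Int) (v : Int) (c : Int) : Prop := 0 ≤ n ∧ 0 ≤ m
instance (n : Int) (m : Int) (v : Int) (c : Int) : Decidable (Pre_count_balanced_arrangements n m v c) := by
  unfold Pre_count_balanced_arrangements; infer_instance

def pvWitness_count_balanced_arrangements : Int × Int × Int × Int := (2, 3, 2, 2)

def Spec_count_balanced_arrangements (n : Int) (m : Int) (v : Int) (c : Int) (out : Int) : Prop :=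
  out = count_balanced_arrangements_alt n m v c
instance (n : Int) (m : Int) (v : Int) (c : Int) (out : Int) :
    Decidable (Spec_count_balanced_arrangements n m v c out) := by
  unfold Spec_count_balanced_arrangements; infer_instance

-- ===== CLAIM (what is proved, stated in full; the proofs are below) =====
def Claim_equal_count_balanced_arrangements : Prop :=
  ∀ (n : Int) (m : Int) (v : Int) (c : Int), Dom_count_balanced_arrangements n m v c →
    Pre_count_balanced_arrangements n m v c →
    Spec_count_balanced_arrangements n m v c (count_balanced_arrangements n m v c)

-- ===== LEMMAS AND PROOFS =====


-- The common recurrence both ports compute: pvF1/pvF2 are the two dp states at cell (i, j).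
def pvF2 (v c : Int) : Nat → Nat → Int
  | i, j =>
    if i = 0 ∧ j = 0 then 1
    else (∑ t ∈ Finset.Ico (j - min j c.toNat) j,
            (if i = 0 ∧ t = 0 then 1
             else (∑ s ∈ (Finset.Ico (i - min i v.toNat) i).attach, pvF2 v c s.1 t) % 100000000)) % 100000000
  termination_by i _ => i
  decreasing_by exact (Finset.mem_Ico.mp s.2).2

def pvF1 (v c : Int) (i j : Nat) : Int :=
  if i = 0 ∧ j = 0 then 1
  else (∑ s ∈ Finset.Ico (i - min i v.toNat) i, pvF2 v c s j) % 100000000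

lemma pvF2_eq (v c : Int) (i j : Nat) :
    pvF2 v c i j = if i = 0 ∧ j = 0 then 1
      else (∑ t ∈ Finset.Ico (j - min j c.toNat) j, pvF1 v c i t) % 100000000 := by
  rw [pvF2]
  by_cases h00 : i = 0 ∧ j = 0
  · rw [if_pos h00, if_pos h00]
  · rw [if_neg h00, if_neg h00]
    congr 1
    apply Finset.sum_congr rfl
    intro t _
    by_cases ht : i = 0 ∧ t = 0
    · rw [if_pos ht, pvF1, if_pos ht]
    · rw [if_neg ht, pvF1, if_neg ht]
      congr 1
      exact Finset.sum_attach _ (fun s => pvF2 v c s t)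

-- prefix sums used by B's invariants
def pvP (v c : Int) (jn t : Nat) : Int := ∑ s ∈ Finset.range t, pvF2 v c s jn
def pvQ (v c : Int) (iN t : Nat) : Int := ∑ s ∈ Finset.range t, pvF1 v c iN s

-- pyRange 0 (N+1) as a mapped List.range
lemma pvRangeCast (N : Int) :
    PySem.List.pyRange 0 (N + 1) 1 = (List.range (N + 1).toNat).map (fun t : Nat => (t : Int)) := by
  rw [PySem.List.pyRange_one]
  simp

-- generic invariant-propagation along a fold over casts of List.range
lemma pvFoldRangeInv {σ : Type} (f : σ → Int → σ) (Inv : Nat → σ → Prop) :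
    ∀ (K : Nat) (s0 : σ), Inv 0 s0 → (∀ t s, t < K → Inv t s → Inv (t + 1) (f s (t : Int))) →
      Inv K (((List.range K).map (fun t : Nat => (t : Int))).foldl f s0) := by
  intro K
  induction K with
  | zero => intro s0 h0 _; simpa using h0
  | succ K ih =>
    intro s0 h0 hstep
    rw [List.range_succ, List.map_append, List.foldl_append]
    exact hstep K _ (Nat.lt_succ_self K)
      (ih s0 h0 (fun t s ht hs => hstep t s (ht.trans (Nat.lt_succ_self K)) hs))

-- a guarded mod-accumulating fold is a single sum mod M
lemma pvFoldMod (p : Int → Prop) [DecidablePred p] (g : Int → Int) :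
    ∀ (l : List Int) (a s : Int), a = s % 100000000 →
      l.foldl (fun acc k => if p k then (acc + g k) % 100000000 else acc) a
        = (s + (l.map (fun k => if p k then g k else 0)).sum) % 100000000 := by
  intro l
  induction l with
  | nil => intro a s h; simpa using h
  | cons k tl ih =>
    intro a s h
    by_cases hp : p k
    · simp only [List.foldl_cons, List.map_cons, List.sum_cons, if_pos hp]
      rw [ih ((a + g k) % 100000000) (s + g k) (by omega)]
      congr 1; ring
    · simp only [List.foldl_cons, List.map_cons, List.sum_cons, if_neg hp]
      rw [ih a s h]
      congr 1; ring

lemma pvSumRange (f : Nat → Int) :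
    ∀ W : Nat, ((List.range W).map f).sum = ∑ kk ∈ Finset.range W, f kk := by
  intro W
  induction W with
  | zero => simp
  | succ W ih => rw [List.range_succ, List.map_append, List.sum_append, Finset.sum_range_succ, ih]; simp

-- window reindexing: sum over offsets k = kk+1 equals sum over absolute positions t = i-k
lemma pvSumWin (g : Nat → Int) (w : Int) (i : Nat) :
    ∑ kk ∈ Finset.range w.toNat, (if kk + 1 ≤ i then g (i - (kk + 1)) else 0)
      = ∑ t ∈ Finset.Ico (i - min i w.toNat) i, g t := by
  rw [← Finset.sum_filter]
  apply Finset.sum_nbij' (i := fun kk => i - (kk + 1)) (j := fun t => i - (t + 1))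
  · intro a ha
    simp only [Finset.mem_filter, Finset.mem_range] at ha
    simp only [Finset.mem_Ico]
    omega
  · intro b hb
    simp only [Finset.mem_Ico] at hb
    simp only [Finset.mem_filter, Finset.mem_range]
    omega
  · intro a ha
    simp only [Finset.mem_filter, Finset.mem_range] at ha
    omega
  · intro b hb
    simp only [Finset.mem_Ico] at hb
    omega
  · intro a _
    rfl

-- getD on a mapped range
lemma pvGetDmr (f : Nat → Int) (n k : Nat) (h : k < n) :
    ((List.range n).map f).getD k 0 = f k := by
  rw [List.getD_eq_getElem?_getD]
  simp [List.getElem?_range, h]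

-- Int-side clamped window bound equals the Nat-side one
lemma pvLoCast (iN : Nat) (w : Int) :
    min (iN : Int) (max 0 ((iN : Int) - w)) = ((iN - min iN w.toNat : Nat) : Int) := by
  omega

-- ===== A-side lemmas =====

-- getD after set / on constant rows
lemma pvGetD_set {α : Type} (l : List α) (n t : Nat) (x d : α) (h : n < l.length) :
    (l.set n x).getD t d = if t = n then x else l.getD t d := by
  by_cases ht : t = n
  · subst ht
    rw [if_pos rfl, List.getD_eq_getElem?_getD, List.getElem?_set_self h]
    rfl
  · rw [if_neg ht, List.getD_eq_getElem?_getD, List.getElem?_set_ne (by omega),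
      ← List.getD_eq_getElem?_getD]

lemma pvGetD_constmap {α β : Type} (l : List α) (x d : β) (t : Nat) (h : t < l.length) :
    (l.map (fun _ => x)).getD t d = x := by
  rw [List.getD_eq_getElem?_getD, List.getElem?_map, List.getElem?_eq_getElem h]
  rfl


lemma pvMapRangeSnoc (f : Nat → Int) (n : Nat) (x : Int) (hx : x = f n) :
    (List.range n).map f ++ [x] = (List.range (n + 1)).map f := by
  rw [List.range_succ, List.map_append, hx]
  rfl


-- ===== A-side lemmas =====

def pvAWF (n' m' : Nat) (dp : List (List (Int × Int))) : Prop :=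
  dp.length = n' + 1 ∧ ∀ t : Nat, t ≤ n' → (dp.getD t []).length = m' + 1

def pvAInv (v c : Int) (n' m' I J : Nat) (dp : List (List (Int × Int))) : Prop :=
  pvAWF n' m' dp ∧ ∀ i j : Nat, i ≤ n' → j ≤ m' →
    pvAGet dp (i : Int) (j : Int) =
      if i < I ∨ (i = I ∧ j < J) then (pvF1 v c i j, pvF2 v c i j)
      else if i = 0 ∧ j = 0 then (1, 1) else (0, 0)

lemma pvARow_upd0 (dp : List (List (Int × Int))) (i j a : Int) (t : Nat)
    (h : i.toNat < dp.length) :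
    (pvAUpd0 dp i j a).getD t [] =
      if t = i.toNat then (dp.getD i.toNat []).set j.toNat (a, (pvAGet dp i j).2)
      else dp.getD t [] := by
  unfold pvAUpd0
  exact pvGetD_set dp i.toNat t _ [] h

lemma pvARow_upd1 (dp : List (List (Int × Int))) (i j b : Int) (t : Nat)
    (h : i.toNat < dp.length) :
    (pvAUpd1 dp i j b).getD t [] =
      if t = i.toNat then (dp.getD i.toNat []).set j.toNat ((pvAGet dp i j).1, b)
      else dp.getD t [] := by
  unfold pvAUpd1
  exact pvGetD_set dp i.toNat t _ [] h

lemma pvAGet_upd0_same (dp : List (List (Int × Int))) (i j a : Int)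
    (hil : i.toNat < dp.length) (hjl : j.toNat < (dp.getD i.toNat []).length) :
    pvAGet (pvAUpd0 dp i j a) i j = (a, (pvAGet dp i j).2) := by
  show ((pvAUpd0 dp i j a).getD i.toNat []).getD j.toNat (0, 0) = _
  rw [pvARow_upd0 dp i j a i.toNat hil, if_pos rfl,
    pvGetD_set _ j.toNat j.toNat _ _ hjl, if_pos rfl]

lemma pvAGet_upd1_same (dp : List (List (Int × Int))) (i j b : Int)
    (hil : i.toNat < dp.length) (hjl : j.toNat < (dp.getD i.toNat []).length) :
    pvAGet (pvAUpd1 dp i j b) i j = ((pvAGet dp i j).1, b) := by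
  show ((pvAUpd1 dp i j b).getD i.toNat []).getD j.toNat (0, 0) = _
  rw [pvARow_upd1 dp i j b i.toNat hil, if_pos rfl,
    pvGetD_set _ j.toNat j.toNat _ _ hjl, if_pos rfl]

lemma pvAGet_upd0_ne (dp : List (List (Int × Int))) (i j a i' j' : Int)
    (hi : 0 ≤ i) (hj : 0 ≤ j) (hi' : 0 ≤ i') (hj' : 0 ≤ j')
    (hil : i.toNat < dp.length) (hne : ¬(i' = i ∧ j' = j)) :
    pvAGet (pvAUpd0 dp i j a) i' j' = pvAGet dp i' j' := by
  show ((pvAUpd0 dp i j a).getD i'.toNat []).getD j'.toNat (0, 0) = _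
  rw [pvARow_upd0 dp i j a i'.toNat hil]
  by_cases hti : i'.toNat = i.toNat
  · rw [if_pos hti]
    have hii : i' = i := by omega
    have hjj : ¬(j' = j) := fun hh => hne ⟨hii, hh⟩
    by_cases hjlen : j.toNat < (dp.getD i.toNat []).length
    · rw [pvGetD_set _ j.toNat j'.toNat _ _ hjlen, if_neg (by omega)]
      simp [pvAGet, hti]
    · rw [List.set_eq_of_length_le (by omega)]
      simp [pvAGet, hti]
  · rw [if_neg hti]
    rfl

lemma pvAGet_upd1_ne (dp : List (List (Int × Int))) (i j b i' j' : Int)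
    (hi : 0 ≤ i) (hj : 0 ≤ j) (hi' : 0 ≤ i') (hj' : 0 ≤ j')
    (hil : i.toNat < dp.length) (hne : ¬(i' = i ∧ j' = j)) :
    pvAGet (pvAUpd1 dp i j b) i' j' = pvAGet dp i' j' := by
  show ((pvAUpd1 dp i j b).getD i'.toNat []).getD j'.toNat (0, 0) = _
  rw [pvARow_upd1 dp i j b i'.toNat hil]
  by_cases hti : i'.toNat = i.toNat
  · rw [if_pos hti]
    have hii : i' = i := by omega
    have hjj : ¬(j' = j) := fun hh => hne ⟨hii, hh⟩
    by_cases hjlen : j.toNat < (dp.getD i.toNat []).length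
    · rw [pvGetD_set _ j.toNat j'.toNat _ _ hjlen, if_neg (by omega)]
      simp [pvAGet, hti]
    · rw [List.set_eq_of_length_le (by omega)]
      simp [pvAGet, hti]
  · rw [if_neg hti]
    rfl

lemma pvAUpd0_self (dp : List (List (Int × Int))) (i j : Int)
    (hil : i.toNat < dp.length) (hjl : j.toNat < (dp.getD i.toNat []).length) :
    pvAUpd0 dp i j ((pvAGet dp i j).1) = dp := by
  unfold pvAUpd0
  have hcell : ((pvAGet dp i j).1, (pvAGet dp i j).2) = (dp.getD i.toNat [])[j.toNat] := by
    show pvAGet dp i j = _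
    unfold pvAGet
    rw [List.getD_eq_getElem?_getD, List.getElem?_eq_getElem hjl]
    rfl
  rw [hcell, List.set_getElem_self]
  have hrow : dp.getD i.toNat [] = dp[i.toNat] := by
    rw [List.getD_eq_getElem?_getD, List.getElem?_eq_getElem hil]
    rfl
  rw [hrow, List.set_getElem_self]

lemma pvAUpd1_self (dp : List (List (Int × Int))) (i j : Int)
    (hil : i.toNat < dp.length) (hjl : j.toNat < (dp.getD i.toNat []).length) :
    pvAUpd1 dp i j ((pvAGet dp i j).2) = dp := by
  unfold pvAUpd1
  have hcell : ((pvAGet dp i j).1, (pvAGet dp i j).2) = (dp.getD i.toNat [])[j.toNat] := by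
    show pvAGet dp i j = _
    unfold pvAGet
    rw [List.getD_eq_getElem?_getD, List.getElem?_eq_getElem hjl]
    rfl
  rw [hcell, List.set_getElem_self]
  have hrow : dp.getD i.toNat [] = dp[i.toNat] := by
    rw [List.getD_eq_getElem?_getD, List.getElem?_eq_getElem hil]
    rfl
  rw [hrow, List.set_getElem_self]

lemma pvAUpd0_idem (dp : List (List (Int × Int))) (i j a a' : Int)
    (hil : i.toNat < dp.length) (hjl : j.toNat < (dp.getD i.toNat []).length) :
    pvAUpd0 (pvAUpd0 dp i j a) i j a' = pvAUpd0 dp i j a' := by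
  have h2 : (pvAGet (pvAUpd0 dp i j a) i j).2 = (pvAGet dp i j).2 := by
    rw [pvAGet_upd0_same dp i j a hil hjl]
  have hrow : (pvAUpd0 dp i j a).getD i.toNat []
      = (dp.getD i.toNat []).set j.toNat (a, (pvAGet dp i j).2) := by
    rw [pvARow_upd0 dp i j a i.toNat hil, if_pos rfl]
  show (pvAUpd0 dp i j a).set i.toNat
      (((pvAUpd0 dp i j a).getD i.toNat []).set j.toNat (a', (pvAGet (pvAUpd0 dp i j a) i j).2)) = _
  rw [h2, hrow, List.set_set]
  show (dp.set i.toNat ((dp.getD i.toNat []).set j.toNat (a, (pvAGet dp i j).2))).set i.toNat _ = _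
  rw [List.set_set]
  rfl

lemma pvAUpd1_idem (dp : List (List (Int × Int))) (i j b b' : Int)
    (hil : i.toNat < dp.length) (hjl : j.toNat < (dp.getD i.toNat []).length) :
    pvAUpd1 (pvAUpd1 dp i j b) i j b' = pvAUpd1 dp i j b' := by
  have h1 : (pvAGet (pvAUpd1 dp i j b) i j).1 = (pvAGet dp i j).1 := by
    rw [pvAGet_upd1_same dp i j b hil hjl]
  have hrow : (pvAUpd1 dp i j b).getD i.toNat []
      = (dp.getD i.toNat []).set j.toNat ((pvAGet dp i j).1, b) := by
    rw [pvARow_upd1 dp i j b i.toNat hil, if_pos rfl]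
  show (pvAUpd1 dp i j b).set i.toNat
      (((pvAUpd1 dp i j b).getD i.toNat []).set j.toNat ((pvAGet (pvAUpd1 dp i j b) i j).1, b')) = _
  rw [h1, hrow, List.set_set]
  show (dp.set i.toNat ((dp.getD i.toNat []).set j.toNat ((pvAGet dp i j).1, b))).set i.toNat _ = _
  rw [List.set_set]
  rfl

lemma pvAInner0_fold (i j : Int) (dp : List (List (Int × Int)))
    (hi : 0 ≤ i) (hj : 0 ≤ j)
    (hil : i.toNat < dp.length) (hjl : j.toNat < (dp.getD i.toNat []).length) :
    ∀ (ks : List Int), (∀ k ∈ ks, 1 ≤ k) → ∀ a : Int,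
      ks.foldl (fun dp k => if 0 ≤ i - k then
          pvAUpd0 dp i j (((pvAGet dp i j).1 + (pvAGet dp (i - k) j).2) % 100000000) else dp)
        (pvAUpd0 dp i j a)
        = pvAUpd0 dp i j (ks.foldl (fun acc k => if 0 ≤ i - k then
            (acc + (pvAGet dp (i - k) j).2) % 100000000 else acc) a) := by
  intro ks
  induction ks with
  | nil => intro _ a; rfl
  | cons k tl ih =>
    intro hk a
    have hk1 : (1 : Int) ≤ k := hk k (by simp)
    have htl : ∀ k ∈ tl, (1 : Int) ≤ k := fun k hk' => hk k (by simp [hk'])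
    simp only [List.foldl_cons]
    by_cases hg : 0 ≤ i - k
    · rw [if_pos hg, if_pos hg]
      have h1 : (pvAGet (pvAUpd0 dp i j a) i j).1 = a := by
        rw [pvAGet_upd0_same dp i j a hil hjl]
    
      have h2 : pvAGet (pvAUpd0 dp i j a) (i - k) j = pvAGet dp (i - k) j :=
        pvAGet_upd0_ne dp i j a (i - k) j hi hj (by omega) hj hil (by intro hh; omega)
      rw [h1, h2, pvAUpd0_idem dp i j _ _ hil hjl]
      exact ih htl _
    · rw [if_neg hg, if_neg hg]
      exact ih htl a

lemma pvAInner0_eq (v i j : Int) (dp : List (List (Int × Int)))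
    (hi : 0 ≤ i) (hj : 0 ≤ j)
    (hil : i.toNat < dp.length) (hjl : j.toNat < (dp.getD i.toNat []).length) :
    pvAInner0 v i j dp = pvAUpd0 dp i j
      ((PySem.List.pyRange 1 (v + 1) 1).foldl (fun acc k => if 0 ≤ i - k then
          (acc + (pvAGet dp (i - k) j).2) % 100000000 else acc) ((pvAGet dp i j).1)) := by
  unfold pvAInner0
  conv_lhs => rw [show dp = pvAUpd0 dp i j ((pvAGet dp i j).1) from (pvAUpd0_self dp i j hil hjl).symm]
  exact pvAInner0_fold i j dp hi hj hil hjl _ (fun k hk => ((PySem.List.mem_pyRange_one).mp hk).1) _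

lemma pvAInner1_fold (i j : Int) (dp : List (List (Int × Int)))
    (hi : 0 ≤ i) (hj : 0 ≤ j)
    (hil : i.toNat < dp.length) (hjl : j.toNat < (dp.getD i.toNat []).length) :
    ∀ (ks : List Int), (∀ k ∈ ks, 1 ≤ k) → ∀ b : Int,
      ks.foldl (fun dp k => if 0 ≤ j - k then
          pvAUpd1 dp i j (((pvAGet dp i j).2 + (pvAGet dp i (j - k)).1) % 100000000) else dp)
        (pvAUpd1 dp i j b)
        = pvAUpd1 dp i j (ks.foldl (fun acc k => if 0 ≤ j - k then
            (acc + (pvAGet dp i (j - k)).1) % 100000000 else acc) b) := by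
  intro ks
  induction ks with
  | nil => intro _ b; rfl
  | cons k tl ih =>
    intro hk b
    have hk1 : (1 : Int) ≤ k := hk k (by simp)
    have htl : ∀ k ∈ tl, (1 : Int) ≤ k := fun k hk' => hk k (by simp [hk'])
    simp only [List.foldl_cons]
    by_cases hg : 0 ≤ j - k
    · rw [if_pos hg, if_pos hg]
      have h1 : (pvAGet (pvAUpd1 dp i j b) i j).2 = b := by
        rw [pvAGet_upd1_same dp i j b hil hjl]
      have h2 : pvAGet (pvAUpd1 dp i j b) i (j - k) = pvAGet dp i (j - k) :=
        pvAGet_upd1_ne dp i j b i (j - k) hi hj hi (by omega) hil (by intro hh; omega)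
      rw [h1, h2, pvAUpd1_idem dp i j _ _ hil hjl]
      exact ih htl _
    · rw [if_neg hg, if_neg hg]
      exact ih htl b

lemma pvAInner1_eq (c i j : Int) (dp : List (List (Int × Int)))
    (hi : 0 ≤ i) (hj : 0 ≤ j)
    (hil : i.toNat < dp.length) (hjl : j.toNat < (dp.getD i.toNat []).length) :
    pvAInner1 c i j dp = pvAUpd1 dp i j
      ((PySem.List.pyRange 1 (c + 1) 1).foldl (fun acc k => if 0 ≤ j - k then
          (acc + (pvAGet dp i (j - k)).1) % 100000000 else acc) ((pvAGet dp i j).2)) := by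
  unfold pvAInner1
  conv_lhs => rw [show dp = pvAUpd1 dp i j ((pvAGet dp i j).2) from (pvAUpd1_self dp i j hil hjl).symm]
  exact pvAInner1_fold i j dp hi hj hil hjl _ (fun k hk => ((PySem.List.mem_pyRange_one).mp hk).1) _

lemma pvAScalar0 (v c : Int) (n' m' I J : Nat) (dp : List (List (Int × Int)))
    (hI : I ≤ n') (hJ : J ≤ m')
    (h : ∀ i j : Nat, i ≤ n' → j ≤ m' → i < I →
      pvAGet dp (i : Int) (j : Int) = (pvF1 v c i j, pvF2 v c i j)) :
    (PySem.List.pyRange 1 (v + 1) 1).foldl (fun acc k => if 0 ≤ (I : Int) - k then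
        (acc + (pvAGet dp ((I : Int) - k) (J : Int)).2) % 100000000 else acc) 0
      = (∑ t ∈ Finset.Ico (I - min I v.toNat) I, pvF2 v c t J) % 100000000 := by
  rw [pvFoldMod (fun k => 0 ≤ (I : Int) - k) (fun k => (pvAGet dp ((I : Int) - k) (J : Int)).2) _ 0 0 (by omega)]
  rw [PySem.List.pyRange_one]
  rw [List.map_map]
  have hmap : ((List.range ((v + 1) - 1).toNat).map
      ((fun k => if 0 ≤ (I : Int) - k then (pvAGet dp ((I : Int) - k) (J : Int)).2 else 0)
        ∘ (fun k : Nat => (1 : Int) + k))).sum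
      = ∑ kk ∈ Finset.range v.toNat, (if kk + 1 ≤ I then pvF2 v c (I - (kk + 1)) J else 0) := by
    have hv : ((v + 1) - 1).toNat = v.toNat := by omega
    rw [hv, pvSumRange]
    apply Finset.sum_congr rfl
    intro kk _
    simp only [Function.comp]
    by_cases hkk : kk + 1 ≤ I
    · rw [if_pos (by omega), if_pos hkk]
      have hcast : (I : Int) - (1 + (kk : Int)) = ((I - (kk + 1) : Nat) : Int) := by omega
      rw [hcast, h (I - (kk + 1)) J (by omega) hJ (by omega)]
    · rw [if_neg (by omega), if_neg hkk]
  rw [hmap, pvSumWin (fun t => pvF2 v c t J) v I, zero_add]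

lemma pvAScalar1 (v c : Int) (n' m' I J : Nat) (dp : List (List (Int × Int)))
    (hI : I ≤ n') (hJ : J ≤ m')
    (h : ∀ j : Nat, j ≤ m' → j < J → (pvAGet dp (I : Int) (j : Int)).1 = pvF1 v c I j) :
    (PySem.List.pyRange 1 (c + 1) 1).foldl (fun acc k => if 0 ≤ (J : Int) - k then
        (acc + (pvAGet dp (I : Int) ((J : Int) - k)).1) % 100000000 else acc) 0
      = (∑ t ∈ Finset.Ico (J - min J c.toNat) J, pvF1 v c I t) % 100000000 := by
  rw [pvFoldMod (fun k => 0 ≤ (J : Int) - k) (fun k => (pvAGet dp (I : Int) ((J : Int) - k)).1) _ 0 0 (by omega)]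
  rw [PySem.List.pyRange_one]
  rw [List.map_map]
  have hmap : ((List.range ((c + 1) - 1).toNat).map
      ((fun k => if 0 ≤ (J : Int) - k then (pvAGet dp (I : Int) ((J : Int) - k)).1 else 0)
        ∘ (fun k : Nat => (1 : Int) + k))).sum
      = ∑ kk ∈ Finset.range c.toNat, (if kk + 1 ≤ J then pvF1 v c I (J - (kk + 1)) else 0) := by
    have hc : ((c + 1) - 1).toNat = c.toNat := by omega
    rw [hc, pvSumRange]
    apply Finset.sum_congr rfl
    intro kk _
    simp only [Function.comp]
    by_cases hkk : kk + 1 ≤ J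
    · rw [if_pos (by omega), if_pos hkk]
      have hcast : (J : Int) - (1 + (kk : Int)) = ((J - (kk + 1) : Nat) : Int) := by omega
      rw [hcast, h (J - (kk + 1)) (by omega) (by omega)]
    · rw [if_neg (by omega), if_neg hkk]
  rw [hmap, pvSumWin (fun t => pvF1 v c I t) c J, zero_add]

lemma pvACell_step (v c : Int) (n' m' I J : Nat) (dp : List (List (Int × Int)))
    (hI : I ≤ n') (hJ : J ≤ m') (hinv : pvAInv v c n' m' I J dp) :
    pvAInv v c n' m' I (J + 1) (pvACell v c (I : Int) (J : Int) dp) := by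
  obtain ⟨hwf, h⟩ := hinv
  have hIl : ((I : Int)).toNat < dp.length := by
    rw [hwf.1]; omega
  have hrowlen : (dp.getD ((I : Int)).toNat []).length = m' + 1 := by
    have := hwf.2 ((I : Int)).toNat (by omega)
    exact this
  have hJl : ((J : Int)).toNat < (dp.getD ((I : Int)).toNat []).length := by
    rw [hrowlen]; omega
  have hbelow : ∀ i j : Nat, i ≤ n' → j ≤ m' → i < I →
      pvAGet dp (i : Int) (j : Int) = (pvF1 v c i j, pvF2 v c i j) := by
    intro i j hi hj hlt
    have := h i j hi hj
    rw [if_pos (Or.inl hlt)] at this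
    exact this
  have hrow : ∀ j : Nat, j ≤ m' → j < J →
      pvAGet dp (I : Int) (j : Int) = (pvF1 v c I j, pvF2 v c I j) := by
    intro j hj hlt
    have := h I j hI hj
    rw [if_pos (Or.inr ⟨rfl, hlt⟩)] at this
    exact this
  have hcur : pvAGet dp (I : Int) (J : Int) = if I = 0 ∧ J = 0 then (1, 1) else (0, 0) := by
    have := h I J hI hJ
    rw [if_neg (by omega)] at this
    exact this
  -- stage 1
  set dpA := (if 0 < (I : Int) then pvAInner0 v (I : Int) (J : Int) dp else dp) with hdpA
  have hA_ne : ∀ i' j' : Int, 0 ≤ i' → 0 ≤ j' → ¬(i' = (I : Int) ∧ j' = (J : Int)) →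
      pvAGet dpA i' j' = pvAGet dp i' j' := by
    intro i' j' hi' hj' hne
    rw [hdpA]
    split
    · rw [pvAInner0_eq v (I : Int) (J : Int) dp (by omega) (by omega) hIl hJl]
      exact pvAGet_upd0_ne dp _ _ _ i' j' (by omega) (by omega) hi' hj' hIl hne
    · rfl
  have hA_cell : pvAGet dpA (I : Int) (J : Int) = (pvF1 v c I J, (pvAGet dp (I : Int) (J : Int)).2) := by
    rw [hdpA]
    by_cases hIpos : 0 < (I : Int)
    · rw [if_pos hIpos, pvAInner0_eq v (I : Int) (J : Int) dp (by omega) (by omega) hIl hJl]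
      rw [pvAGet_upd0_same dp _ _ _ hIl hJl]
      have hstart : (pvAGet dp (I : Int) (J : Int)).1 = 0 := by
        rw [hcur, if_neg (by omega)]
      rw [hstart, pvAScalar0 v c n' m' I J dp hI hJ hbelow]
      rw [pvF1, if_neg (by omega)]
    · rw [if_neg hIpos]
      have hI0 : I = 0 := by omega
      subst hI0
      by_cases hJ0 : J = 0
      · subst hJ0
        rw [hcur]
        simp [pvF1]
      · have hne00 : ¬((0 : Nat) = 0 ∧ J = 0) := by omega
        rw [hcur, if_neg hne00, pvF1, if_neg hne00]
        have hz : (0 : Nat) - min 0 v.toNat = 0 := by omega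
        rw [hz]
        simp
  -- dpA is well-formed and has the same shape
  have hwfA : pvAWF n' m' dpA := by
    rw [hdpA]
    split
    · rw [pvAInner0_eq v (I : Int) (J : Int) dp (by omega) (by omega) hIl hJl]
      constructor
      · show (pvAUpd0 dp _ _ _).length = n' + 1
        unfold pvAUpd0
        rw [List.length_set, hwf.1]
      · intro t ht
        rw [pvARow_upd0 dp _ _ _ t hIl]
        by_cases htI : t = ((I : Int)).toNat
        · rw [if_pos htI, List.length_set]
          subst htI
          exact hrowlen
        · rw [if_neg htI]
          exact hwf.2 t ht
    · exact hwf
  have hIlA : ((I : Int)).toNat < dpA.length := by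
    rw [hwfA.1]; omega
  have hJlA : ((J : Int)).toNat < (dpA.getD ((I : Int)).toNat []).length := by
    rw [hwfA.2 ((I : Int)).toNat (by omega)]; omega
  -- stage 2
  set dpB := (if 0 < (J : Int) then pvAInner1 c (I : Int) (J : Int) dpA else dpA) with hdpB
  have hB_ne : ∀ i' j' : Int, 0 ≤ i' → 0 ≤ j' → ¬(i' = (I : Int) ∧ j' = (J : Int)) →
      pvAGet dpB i' j' = pvAGet dp i' j' := by
    intro i' j' hi' hj' hne
    rw [hdpB]
    split
    · rw [pvAInner1_eq c (I : Int) (J : Int) dpA (by omega) (by omega) hIlA hJlA]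
      rw [pvAGet_upd1_ne dpA _ _ _ i' j' (by omega) (by omega) hi' hj' hIlA hne]
      exact hA_ne i' j' hi' hj' hne
    · exact hA_ne i' j' hi' hj' hne
  have hB_cell : pvAGet dpB (I : Int) (J : Int) = (pvF1 v c I J, pvF2 v c I J) := by
    rw [hdpB]
    by_cases hJpos : 0 < (J : Int)
    · have hJn : 0 < J := by omega
      have hne00 : ¬(I = 0 ∧ J = 0) := by omega
      rw [if_pos hJpos, pvAInner1_eq c (I : Int) (J : Int) dpA (by omega) (by omega) hIlA hJlA]
      rw [pvAGet_upd1_same dpA _ _ _ hIlA hJlA]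
      have hfst : (pvAGet dpA (I : Int) (J : Int)).1 = pvF1 v c I J := by rw [hA_cell]
      have hstart : (pvAGet dpA (I : Int) (J : Int)).2 = 0 := by
        rw [hA_cell]
        show (pvAGet dp (I : Int) (J : Int)).2 = 0
        rw [hcur, if_neg hne00]
      have hrowA : ∀ j : Nat, j ≤ m' → j < J → (pvAGet dpA (I : Int) (j : Int)).1 = pvF1 v c I j := by
        intro j hj hlt
        rw [hA_ne (I : Int) (j : Int) (by omega) (by omega) (by intro hh; omega), hrow j hj hlt]
      rw [hstart, pvAScalar1 v c n' m' I J dpA hI hJ hrowA, hfst]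
      rw [pvF2_eq, if_neg hne00]
    · rw [if_neg hJpos]
      rw [hA_cell]
      have hJ0 : J = 0 := by omega
      subst hJ0
      by_cases hI0 : I = 0
      · subst hI0
        rw [hcur]
        simp [pvF2_eq]
      · have hne00 : ¬(I = 0 ∧ (0 : Nat) = 0) := by omega
        rw [hcur, if_neg hne00, pvF2_eq, if_neg hne00]
        have hz : (0 : Nat) - min 0 c.toNat = 0 := by omega
        rw [hz]
        simp
  have hwfB : pvAWF n' m' dpB := by
    rw [hdpB]
    split
    · rw [pvAInner1_eq c (I : Int) (J : Int) dpA (by omega) (by omega) hIlA hJlA]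
      constructor
      · show (pvAUpd1 dpA _ _ _).length = n' + 1
        unfold pvAUpd1
        rw [List.length_set, hwfA.1]
      · intro t ht
        rw [pvARow_upd1 dpA _ _ _ t hIlA]
        by_cases htI : t = ((I : Int)).toNat
        · rw [if_pos htI, List.length_set]
          subst htI
          exact hwfA.2 _ (by omega)
        · rw [if_neg htI]
          exact hwfA.2 t ht
    · exact hwfA
  -- assemble
  have hcell : pvACell v c (I : Int) (J : Int) dp = dpB := by
    rw [hdpB, hdpA]; rfl
  rw [hcell]
  refine ⟨hwfB, ?_⟩
  intro i j hi hj
  by_cases hij : i = I ∧ j = J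
  · obtain ⟨hi', hj'⟩ := hij
    subst hi'; subst hj'
    rw [hB_cell, if_pos (Or.inr ⟨rfl, by omega⟩)]
  · have hne : ¬((i : Int) = (I : Int) ∧ (j : Int) = (J : Int)) := by
      intro hh
      exact hij ⟨by exact_mod_cast hh.1, by exact_mod_cast hh.2⟩
    rw [hB_ne (i : Int) (j : Int) (by omega) (by omega) hne, h i j hi hj]
    by_cases hproc : i < I ∨ (i = I ∧ j < J)
    · rw [if_pos hproc, if_pos (show i < I ∨ (i = I ∧ j < J + 1) by omega)]
    · rw [if_neg hproc, if_neg (show ¬(i < I ∨ (i = I ∧ j < J + 1)) by omega)]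

lemma pvARow_inv (v c : Int) (n' m' I : Nat) (dp : List (List (Int × Int)))
    (hI : I ≤ n') (h : pvAInv v c n' m' I 0 dp) :
    pvAInv v c n' m' (I + 1) 0
      (((List.range (m' + 1)).map (fun t : Nat => (t : Int))).foldl
        (fun dp j => pvACell v c (I : Int) j dp) dp) := by
  have hend := pvFoldRangeInv (fun dp j => pvACell v c (I : Int) j dp)
    (fun J dp => J ≤ m' + 1 ∧ pvAInv v c n' m' I J dp) (m' + 1) dp ⟨by omega, h⟩
    (fun J dp hJ ⟨_, hinv⟩ => ⟨by omega, pvACell_step v c n' m' I J dp hI (by omega) hinv⟩)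
  obtain ⟨-, hwf, hinv⟩ := hend
  refine ⟨hwf, ?_⟩
  intro i j hi hj
  rw [hinv i j hi hj]
  by_cases hp : i < I + 1
  · rw [if_pos (show i < I ∨ (i = I ∧ j < m' + 1) by omega),
        if_pos (show i < I + 1 ∨ (i = I + 1 ∧ j < 0) by omega)]
  · rw [if_neg (show ¬(i < I ∨ (i = I ∧ j < m' + 1)) by omega),
        if_neg (show ¬(i < I + 1 ∨ (i = I + 1 ∧ j < 0)) by omega)]

lemma pvA_eq (n m v c : Int) (hn : 0 ≤ n) (hm : 0 ≤ m) :
    count_balanced_arrangements n m v c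
      = (pvF1 v c n.toNat m.toNat + pvF2 v c n.toNat m.toNat) % 100000000 := by
  simp only [count_balanced_arrangements]
  rw [pvRangeCast n, pvRangeCast m]
  -- shape of the freshly built grid
  have hlen0 : (((List.range (n + 1).toNat).map (fun t : Nat => (t : Int))).map
      (fun _ => ((List.range (m + 1).toNat).map (fun t : Nat => (t : Int))).map
        (fun _ => ((0 : Int), (0 : Int))))).length = n.toNat + 1 := by
    simp
    omega
  have hrow0 : ∀ t : Nat, t ≤ n.toNat →
      ((((List.range (n + 1).toNat).map (fun t : Nat => (t : Int))).map
        (fun _ => ((List.range (m + 1).toNat).map (fun t : Nat => (t : Int))).map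
          (fun _ => ((0 : Int), (0 : Int))))).getD t []).length = m.toNat + 1 := by
    intro t ht
    rw [pvGetD_constmap _ _ _ t (by simp; omega)]
    simp
    omega
  set dp0 := ((List.range (n + 1).toNat).map (fun t : Nat => (t : Int))).map
      (fun _ => ((List.range (m + 1).toNat).map (fun t : Nat => (t : Int))).map
        (fun _ => ((0 : Int), (0 : Int)))) with hdp0
  have hwf0 : pvAWF n.toNat m.toNat dp0 := ⟨hlen0, hrow0⟩
  have hget0 : ∀ i j : Nat, i ≤ n.toNat → j ≤ m.toNat →
      pvAGet dp0 (i : Int) (j : Int) = (0, 0) := by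
    intro i j hi hj
    show (dp0.getD ((i : Int)).toNat []).getD ((j : Int)).toNat (0, 0) = (0, 0)
    rw [hdp0, pvGetD_constmap _ _ _ _ (by simp; omega)]
    rw [pvGetD_constmap _ _ _ _ (by simp; omega)]
  have h0l : ((0 : Int)).toNat < dp0.length := by rw [hwf0.1]; omega
  have h0r : ((0 : Int)).toNat < (dp0.getD ((0 : Int)).toNat []).length := by
    simp only [Int.toNat_zero]
    rw [hwf0.2 0 (by omega)]
    omega
  set dp1 := pvAUpd0 dp0 0 0 1 with hdp1
  have hwf1 : pvAWF n.toNat m.toNat dp1 := by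
    constructor
    · show (pvAUpd0 dp0 0 0 1).length = _
      unfold pvAUpd0
      rw [List.length_set, hwf0.1]
    · intro t ht
      rw [hdp1, pvARow_upd0 dp0 0 0 1 t h0l]
      by_cases ht0 : t = ((0 : Int)).toNat
      · rw [if_pos ht0, List.length_set]
        subst ht0
        exact hwf0.2 _ (by omega)
      · rw [if_neg ht0]
        exact hwf0.2 t ht
  have h1l : ((0 : Int)).toNat < dp1.length := by rw [hwf1.1]; omega
  have h1r : ((0 : Int)).toNat < (dp1.getD ((0 : Int)).toNat []).length := by
    simp only [Int.toNat_zero]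
    rw [hwf1.2 0 (by omega)]
    omega
  set dp2 := pvAUpd1 dp1 0 0 1 with hdp2
  have hwf2 : pvAWF n.toNat m.toNat dp2 := by
    constructor
    · show (pvAUpd1 dp1 0 0 1).length = _
      unfold pvAUpd1
      rw [List.length_set, hwf1.1]
    · intro t ht
      rw [hdp2, pvARow_upd1 dp1 0 0 1 t h1l]
      by_cases ht0 : t = ((0 : Int)).toNat
      · rw [if_pos ht0, List.length_set]
        subst ht0
        exact hwf1.2 _ (by omega)
      · rw [if_neg ht0]
        exact hwf1.2 t ht
  have hget2 : ∀ i j : Nat, i ≤ n.toNat → j ≤ m.toNat →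
      pvAGet dp2 (i : Int) (j : Int) = if i = 0 ∧ j = 0 then (1, 1) else (0, 0) := by
    intro i j hi hj
    by_cases h00 : i = 0 ∧ j = 0
    · obtain ⟨hi0, hj0⟩ := h00
      subst hi0; subst hj0
      rw [if_pos ⟨rfl, rfl⟩]
      have c1 : pvAGet dp1 (0 : Int) (0 : Int) = (1, (pvAGet dp0 0 0).2) :=
        pvAGet_upd0_same dp0 0 0 1 h0l h0r
      have c2 : pvAGet dp2 (0 : Int) (0 : Int) = ((pvAGet dp1 0 0).1, 1) :=
        pvAGet_upd1_same dp1 0 0 1 h1l h1r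
      have hz : pvAGet dp0 (0 : Int) (0 : Int) = (0, 0) := hget0 0 0 (by omega) (by omega)
      have : pvAGet dp2 (0 : Int) (0 : Int) = (1, 1) := by
        rw [c2, c1]
      show pvAGet dp2 ((0 : Nat) : Int) ((0 : Nat) : Int) = (1, 1)
      simpa using this
    · rw [if_neg h00]
      have hne : ¬((i : Int) = 0 ∧ (j : Int) = 0) := by omega
      rw [hdp2, pvAGet_upd1_ne dp1 0 0 1 (i : Int) (j : Int) (by omega) (by omega) (by omega) (by omega) h1l hne]
      rw [hdp1, pvAGet_upd0_ne dp0 0 0 1 (i : Int) (j : Int) (by omega) (by omega) (by omega) (by omega) h0l hne]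
      exact hget0 i j hi hj
  have hfin := pvFoldRangeInv
    (fun dp (i : Int) => ((List.range (m + 1).toNat).map (fun t : Nat => (t : Int))).foldl
      (fun dp j => pvACell v c i j dp) dp)
    (fun I dp => I ≤ n.toNat + 1 ∧ pvAInv v c n.toNat m.toNat I 0 dp) ((n + 1).toNat)
    dp2
    ⟨by omega, hwf2, by
      intro i j hi hj
      rw [if_neg (by omega)]
      exact hget2 i j hi hj⟩
    (fun I dp hIK hh => by
      obtain ⟨hIle, hinv⟩ := hh
      have hm1 : (m + 1).toNat = m.toNat + 1 := by omega
      have hI : I ≤ n.toNat := by omega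
      refine ⟨by omega, ?_⟩
      rw [hm1]
      exact pvARow_inv v c n.toNat m.toNat I dp hI hinv)
  obtain ⟨-, -, hinv⟩ := hfin
  have hcell := hinv n.toNat m.toNat (le_refl _) (le_refl _)
  rw [if_pos (show n.toNat < (n + 1).toNat ∨ (n.toNat = (n + 1).toNat ∧ m.toNat < 0) by omega)] at hcell
  have hn' : ((n.toNat : Nat) : Int) = n := by omega
  have hm' : ((m.toNat : Nat) : Int) = m := by omega
  rw [hn', hm'] at hcell
  rw [hcell]

-- ===== B-side lemmas =====

def pvBInnerInv (v c : Int) (m' iN jj : Nat) (s : List (List Int) × List Int × Int × Int) : Prop :=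
  s.1.length = m' + 1
  ∧ (∀ jn : Nat, jn ≤ m' → s.1.getD jn [] = (List.range (if jn < jj then iN + 2 else iN + 1)).map (pvP v c jn))
  ∧ s.2.1 = (List.range (jj + 1)).map (pvQ v c iN)
  ∧ (0 < jj → s.2.2 = (pvF1 v c iN (jj - 1), pvF2 v c iN (jj - 1)))

lemma pvBDD_spec (v c : Int) (iN jj : Nat)
    (pref1 : List (List Int)) (rowpref0 : List Int)
    (hcol : pref1.getD jj [] = (List.range (iN + 1)).map (pvP v c jj))
    (hrow : rowpref0 = (List.range (jj + 1)).map (pvQ v c iN)) :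
    pvBDD v c (iN : Int) (jj : Int) pref1 rowpref0 = (pvF1 v c iN jj, pvF2 v c iN jj) := by
  unfold pvBDD
  by_cases h00 : iN = 0 ∧ jj = 0
  · rw [if_pos (show (iN : Int) = 0 ∧ (jj : Int) = 0 by omega)]
    rw [pvF1, if_pos h00, pvF2_eq, if_pos h00]
  · rw [if_neg (show ¬((iN : Int) = 0 ∧ (jj : Int) = 0) by omega)]
    have hcol' : PySem.List.pyGetD pref1 (jj : Int) [] = (List.range (iN + 1)).map (pvP v c jj) := by
      rw [PySem.List.pyGetD_natCast]
      exact hcol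
    have hd0 : (PySem.List.pyGetD (PySem.List.pyGetD pref1 (jj : Int) []) (iN : Int) 0
        - PySem.List.pyGetD (PySem.List.pyGetD pref1 (jj : Int) [])
            (min (iN : Int) (max 0 ((iN : Int) - v))) 0) % 100000000
        = pvF1 v c iN jj := by
      rw [hcol', pvLoCast iN v, PySem.List.pyGetD_natCast, PySem.List.pyGetD_natCast]
      rw [pvGetDmr _ _ _ (by omega), pvGetDmr _ _ _ (by omega)]
      rw [pvF1, if_neg h00]
      congr 1
      unfold pvP
      rw [Finset.sum_Ico_eq_sub _ (by omega : iN - min iN v.toNat ≤ iN)]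
    have hd1 : (PySem.List.pyGetD rowpref0 (jj : Int) 0
        - PySem.List.pyGetD rowpref0 (min (jj : Int) (max 0 ((jj : Int) - c))) 0) % 100000000
        = pvF2 v c iN jj := by
      rw [hrow, pvLoCast jj c, PySem.List.pyGetD_natCast, PySem.List.pyGetD_natCast]
      rw [pvGetDmr _ _ _ (by omega), pvGetDmr _ _ _ (by omega)]
      rw [pvF2_eq, if_neg h00]
      congr 1
      unfold pvQ
      rw [Finset.sum_Ico_eq_sub _ (by omega : jj - min jj c.toNat ≤ jj)]
    show ((PySem.List.pyGetD (PySem.List.pyGetD pref1 (jj : Int) []) (iN : Int) 0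
        - PySem.List.pyGetD (PySem.List.pyGetD pref1 (jj : Int) [])
            (min (iN : Int) (max 0 ((iN : Int) - v))) 0) % 100000000,
      (PySem.List.pyGetD rowpref0 (jj : Int) 0
        - PySem.List.pyGetD rowpref0 (min (jj : Int) (max 0 ((jj : Int) - c))) 0) % 100000000) = _
    rw [hd0, hd1]

lemma pvBCell_step (v c : Int) (m' iN jj : Nat)
    (s : List (List Int) × List Int × Int × Int)
    (hjj : jj ≤ m') (h : pvBInnerInv v c m' iN jj s) :
    pvBInnerInv v c m' iN (jj + 1) (pvBCell v c (iN : Int) (jj : Int) s) := by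
  obtain ⟨hlen, hpref, hrow, _⟩ := h
  have hcol : s.1.getD jj [] = (List.range (iN + 1)).map (pvP v c jj) := by
    rw [hpref jj hjj, if_neg (by omega)]
  have hdd : pvBDD v c (iN : Int) (jj : Int) s.1 s.2.1 = (pvF1 v c iN jj, pvF2 v c iN jj) :=
    pvBDD_spec v c iN jj s.1 s.2.1 hcol hrow
  have hjjl : ((jj : Int)).toNat < s.1.length := by rw [hlen]; omega
  refine ⟨?_, ?_, ?_, ?_⟩
  · show (s.1.set ((jj : Int)).toNat _).length = m' + 1
    rw [List.length_set, hlen]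
  · intro jn hjn
    show (s.1.set ((jj : Int)).toNat (PySem.List.pyGetD s.1 (jj : Int) []
        ++ [PySem.List.pyGetD (PySem.List.pyGetD s.1 (jj : Int) []) (iN : Int) 0
            + (pvBDD v c (iN : Int) (jj : Int) s.1 s.2.1).2])).getD jn [] = _
    rw [pvGetD_set _ _ jn _ _ hjjl]
    by_cases hjnjj : jn = jj
    · subst hjnjj
      rw [if_pos (by omega), hdd, PySem.List.pyGetD_natCast, hcol, PySem.List.pyGetD_natCast,
        pvGetDmr _ _ _ (by omega)]
      rw [if_pos (by omega)]
      exact pvMapRangeSnoc _ _ _ (by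
        show pvP v c jn iN + pvF2 v c iN jn = pvP v c jn (iN + 1)
        unfold pvP
        rw [Finset.sum_range_succ])
    · rw [if_neg (by omega), hpref jn hjn]
      by_cases hlt : jn < jj
      · rw [if_pos hlt, if_pos (by omega)]
      · rw [if_neg hlt, if_neg (by omega)]
  · show s.2.1 ++ [PySem.List.pyGetD s.2.1 (jj : Int) 0
        + (pvBDD v c (iN : Int) (jj : Int) s.1 s.2.1).1] = _
    rw [hdd, hrow, PySem.List.pyGetD_natCast, pvGetDmr _ _ _ (by omega)]
    exact pvMapRangeSnoc _ _ _ (by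
      show pvQ v c iN jj + pvF1 v c iN jj = pvQ v c iN (jj + 1)
      unfold pvQ
      rw [Finset.sum_range_succ])
  · intro _
    show pvBDD v c (iN : Int) (jj : Int) s.1 s.2.1 = _
    rw [hdd]
    norm_num

def pvBOutInv (v c : Int) (m' iN : Nat) (s : List (List Int) × Int × Int) : Prop :=
  s.1.length = m' + 1
  ∧ (∀ jn : Nat, jn ≤ m' → s.1.getD jn [] = (List.range (iN + 1)).map (pvP v c jn))
  ∧ (0 < iN → s.2 = (pvF1 v c (iN - 1) m', pvF2 v c (iN - 1) m'))

lemma pvBRow_inv (v c : Int) (m' iN : Nat) (s : List (List Int) × Int × Int)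
    (h : pvBOutInv v c m' iN s) :
    pvBOutInv v c m' (iN + 1) (pvBRow (m' : Int) v c (iN : Int) s) := by
  obtain ⟨hlen, hpref, -⟩ := h
  unfold pvBRow
  rw [pvRangeCast (m' : Int)]
  have hm1 : ((m' : Int) + 1).toNat = m' + 1 := by omega
  rw [hm1]
  have hinner := pvFoldRangeInv (fun s j => pvBCell v c (iN : Int) j s)
    (fun jj s' => jj ≤ m' + 1 ∧ pvBInnerInv v c m' iN jj s') (m' + 1)
    (s.1, ([0] : List Int), s.2)
    ⟨by omega, by
      refine ⟨hlen, ?_, ?_, ?_⟩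
      · intro jn hjn
        show s.1.getD jn [] = _
        rw [if_neg (by omega)]
        exact hpref jn hjn
      · show ([0] : List Int) = _
        simp [pvQ]
      · intro hh; omega⟩
    (fun jj s' hjj hh => ⟨by omega, pvBCell_step v c m' iN jj s' (by omega) hh.2⟩)
  obtain ⟨-, hl, hp, hr, hd⟩ := hinner
  refine ⟨hl, ?_, ?_⟩
  · intro jn hjn
    have := hp jn hjn
    rw [if_pos (by omega)] at this
    exact this
  · intro _
    have := hd (by omega)
    rw [this]
    norm_num

lemma pvB_eq (n m v c : Int) (hn : 0 ≤ n) (hm : 0 ≤ m) :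
    count_balanced_arrangements_alt n m v c
      = (pvF1 v c n.toNat m.toNat + pvF2 v c n.toNat m.toNat) % 100000000 := by
  simp only [count_balanced_arrangements_alt]
  rw [pvRangeCast n, pvRangeCast m]
  have hmm : m = ((m.toNat : Nat) : Int) := by omega
  have hfin := pvFoldRangeInv (fun s (i : Int) => pvBRow m v c i s)
    (fun iN s => iN ≤ n.toNat + 1 ∧ pvBOutInv v c m.toNat iN s) ((n + 1).toNat)
    (((List.range (m + 1).toNat).map (fun t : Nat => (t : Int))).map (fun _ => ([0] : List Int)),
      (0 : Int), (0 : Int))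
    ⟨by omega, by
      refine ⟨?_, ?_, ?_⟩
      · show (((List.range (m + 1).toNat).map (fun t : Nat => (t : Int))).map
          (fun _ => ([0] : List Int))).length = _
        simp
        omega
      · intro jn hjn
        show (((List.range (m + 1).toNat).map (fun t : Nat => (t : Int))).map
          (fun _ => ([0] : List Int))).getD jn [] = _
        rw [pvGetD_constmap _ _ _ jn (by simp; omega)]
        simp [pvP]
      · intro hh; omega⟩
    (fun iN s hiK hh => ⟨by omega, by
      have := pvBRow_inv v c m.toNat iN s hh.2
      rw [← hmm] at this
      exact this⟩)
  obtain ⟨-, -, -, hd⟩ := hfin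
  have hn1 : (n + 1).toNat = n.toNat + 1 := by omega
  rw [hn1] at hd ⊢
  have := hd (by omega)
  rw [this]
  simp

-- ===== VERDICT (by name: the statement is the Claim_ definition above) =====
theorem count_balanced_arrangements_spec : Claim_equal_count_balanced_arrangements := by
  intro n m v c _ hpre
  unfold Spec_count_balanced_arrangements
  rw [pvA_eq n m v c hpre.1 hpre.2, pvB_eq n m v c hpre.1 hpre.2]
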